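-- pv_equiv track=rewrite | github.com/donaldrauscher/hospital-readmissions | voting_classifier_weights.py | stars_and_bars
-- ===== SOURCE A (Python) =====
-- def stars_and_bars(bins, stars, allowEmpty = True):
--     # validate inputes
--     if bins < 1 or stars < 1:
--         raise ValueError("Number of objects (stars) and bins must both be greater than or equal to 1.")
--     if not allowEmpty and stars < bins:
--         raise ValueError("Number of objects (stars) must be greater than or equal to the number of bins.")
--
--     # if there is only one bin, there is only one arrangement!
--     if bins == 1:
--         yield stars,
--         return
--
--     # if empty bins are not allowed, distribute (star-bins) stars and add an extra star to each bin when yielding.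
--     if not allowEmpty:
--         if stars == bins:
--             # If same number of stars and bins, then there is only one arrangement!
--             yield tuple([1] * bins)
--             return
--         else:
--             stars -= bins
--
--     # 'bars' holds the queue or stack of positions of the bars in the stars and bars arrangement
--     # (including a bar at the beginning and end) and the level of iteration that this stack item has reached.
--     # Initial stack holds a single arrangement ||...||*****...****| with an iteration level of 1.
--     bars = [([0]*bins + [stars], 1)]
--
--     # iterate through the current queue of arrangements until no more are left (all arrangements have been yielded)
--     while len(bars) > 0:
--         newBars = []
--
--         for b in bars:
--             # iterate through inner arrangements of b, yielding each arrangement and queuing each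
--             # arrangement for further iteration except the very first
--             for x in range(b[0][-2], stars+1):
--                 newBar = b[0][1:bins] + [x, stars]
--                 if b[1] < bins-1 and x > 0:
--                     newBars.append((newBar, b[1]+1))
--
--                 # translate the stars and bars into a tuple
--                 yield tuple(newBar[y] - newBar[y-1] + (0 if allowEmpty else 1) for y in range(1, bins+1))
--
--         bars = newBars
-- ===== SOURCE B (Python) =====
-- def stars_and_bars(bins, stars, allowEmpty = True):
--     # validate inputs (same guards as A; lazy, since this is a generator)
--     if bins < 1 or stars < 1:
--         raise ValueError("Number of objects (stars) and bins must both be greater than or equal to 1.")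
--     if not allowEmpty and stars < bins:
--         raise ValueError("Number of objects (stars) must be greater than or equal to the number of bins.")
--
--     # distribute `total` surplus stars; add `shift` to every component when yielding
--     shift = 0 if allowEmpty else 1
--     total = stars - shift * bins
--
--     def comps(k, t):
--         # lexicographic compositions of t into k non-negative parts, shifted by `shift`
--         if k == 1:
--             yield (t + shift,)
--         else:
--             for x in range(t + 1):
--                 for rest in comps(k - 1, t - x):
--                     yield (x + shift,) + rest
--
--     yield from comps(bins, total)
-- ===== Notes on version B (the rewrite author's own statement) =====
-- stated objective: simpler
-- what changed: A enumerates arrangements with a level-by-level queue (BFS) of bar-position lists that it slices and diffs; B is a direct recursive generator of the compositions in lexicographic order (choose the first part, recurse on the rest), with the allowEmpty case handled by a uniform +1 shift.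
import Mathlib
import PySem

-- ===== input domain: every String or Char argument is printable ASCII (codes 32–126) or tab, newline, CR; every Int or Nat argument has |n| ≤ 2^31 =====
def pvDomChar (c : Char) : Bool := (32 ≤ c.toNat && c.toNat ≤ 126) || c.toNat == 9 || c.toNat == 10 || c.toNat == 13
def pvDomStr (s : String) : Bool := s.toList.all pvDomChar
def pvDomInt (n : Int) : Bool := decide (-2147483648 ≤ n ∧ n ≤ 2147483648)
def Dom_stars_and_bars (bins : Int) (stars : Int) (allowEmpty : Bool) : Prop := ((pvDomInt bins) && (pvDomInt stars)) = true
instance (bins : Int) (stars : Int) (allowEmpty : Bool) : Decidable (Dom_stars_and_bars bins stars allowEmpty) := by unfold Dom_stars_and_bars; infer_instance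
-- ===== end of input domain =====

-- B replaces A's level-by-level queue of bar-position lists with a simple recursive
-- lexicographic composition generator (same values, same order); objective: simpler.


-- ===== PORT A =====
-- one level of A's while loop: fold over the queue `bars`, inner fold over
-- range(b[0][-2], stars + 1), accumulating (yielded tuples, newBars)
def sabLevel (bins stars2 sh : Int) (bars : List (List Int × Int)) :
    List (List Int) × List (List Int × Int) :=
  bars.foldl (fun acc b =>
    (PySem.List.pyRange (PySem.List.pyGetD b.1 (-2) 0) (stars2 + 1) 1).foldl (fun acc2 x =>
      let newBar := PySem.List.slice b.1 (some 1) (some bins) ++ [x, stars2]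
      let nbs := if b.2 < bins - 1 ∧ 0 < x then acc2.2 ++ [(newBar, b.2 + 1)] else acc2.2
      (acc2.1 ++ [(PySem.List.pyRange 1 (bins + 1) 1).map (fun y =>
          PySem.List.pyGetD newBar y 0 - PySem.List.pyGetD newBar (y - 1) 0 + sh)], nbs))
      acc) ([], [])

def sabLoop (bins stars2 sh : Int) : Nat → List (List Int × Int) → List (List Int)
  | 0, _ => []
  | fuel + 1, bars =>
    if 0 < bars.length then
      let p := sabLevel bins stars2 sh bars
      p.1 ++ sabLoop bins stars2 sh fuel p.2
    else []


def stars_and_bars (bins : Int) (stars : Int) (allowEmpty : Bool) : List (List Int) :=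
  if bins < 1 ∨ stars < 1 then []
  else if allowEmpty = false ∧ stars < bins then []
  else if bins = 1 then [[stars]]
  else if allowEmpty = false ∧ stars = bins then [List.replicate bins.toNat 1]
  else
    let stars2 := if allowEmpty = false then stars - bins else stars
    let sh : Int := if allowEmpty then 0 else 1
    sabLoop bins stars2 sh bins.toNat [(List.replicate bins.toNat 0 ++ [stars2], 1)]


-- ===== PORT B =====
-- comps(k, t) of Source B: lexicographic compositions of t into k parts, each part shifted by sh
def sabComps (sh : Int) : Nat → Int → List (List Int)
  | 0, _ => []
  | 1, t => [[t + sh]]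
  | k + 2, t =>
    (PySem.List.pyRange 0 (t + 1) 1).flatMap (fun x =>
      (sabComps sh (k + 1) (t - x)).map (fun rest => (x + sh) :: rest))


def stars_and_bars_alt (bins : Int) (stars : Int) (allowEmpty : Bool) : List (List Int) :=
  if bins < 1 ∨ stars < 1 then []
  else if allowEmpty = false ∧ stars < bins then []
  else
    let sh : Int := if allowEmpty then 0 else 1
    let total := stars - sh * bins
    sabComps sh bins.toNat total


-- ===== PRECONDITION & SPEC =====
-- Pre_ excludes exactly the inputs on which the Python A raises ValueError (its two guards).
def Pre_stars_and_bars (bins : Int) (stars : Int) (allowEmpty : Bool) : Prop :=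
  1 ≤ bins ∧ 1 ≤ stars ∧ (allowEmpty = true ∨ bins ≤ stars)
instance (bins : Int) (stars : Int) (allowEmpty : Bool) : Decidable (Pre_stars_and_bars bins stars allowEmpty) := by unfold Pre_stars_and_bars; infer_instance
def pvWitness_stars_and_bars : Int × Int × Bool := (3, 4, false)

def Spec_stars_and_bars (bins : Int) (stars : Int) (allowEmpty : Bool) (out : List (List Int)) : Prop := out = stars_and_bars_alt bins stars allowEmpty
instance (bins : Int) (stars : Int) (allowEmpty : Bool) (out : List (List Int)) : Decidable (Spec_stars_and_bars bins stars allowEmpty out) := by unfold Spec_stars_and_bars; infer_instance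

-- ===== CLAIM (what is proved, stated in full; the proofs are below) =====
def Claim_equal_stars_and_bars : Prop := ∀ (bins : Int) (stars : Int) (allowEmpty : Bool), Dom_stars_and_bars bins stars allowEmpty → Pre_stars_and_bars bins stars allowEmpty → Spec_stars_and_bars bins stars allowEmpty (stars_and_bars bins stars allowEmpty)

-- ===== LEMMAS AND PROOFS =====

def rng (a b : Int) : List Int := PySem.List.pyRange a b 1
def NV (s : Int) : Nat → List (List Int)
  | 0 => [[]]
  | k + 1 => (NV s k).flatMap (fun b => (rng (b.getLastD 0) (s + 1)).map (fun x => b ++ [x]))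
def NVp (s : Int) : Nat → List (List Int)
  | 0 => [[]]
  | k + 1 => (NVp s k).flatMap (fun b =>
      ((rng (b.getLastD 0) (s + 1)).filter (fun x => decide (0 < x))).map (fun x => b ++ [x]))
lemma rng_shift (a b c : Int) : rng (a + c) (b + c) = (rng a b).map (fun x => x + c) := by
  simp [rng, PySem.List.pyRange_one, List.map_map]; intro k _; ring
lemma filter_pos_rng (a m : Int) (h : 1 ≤ a) :
    (rng a m).filter (fun x => decide (0 < x)) = rng a m := by
  apply List.filter_eq_self.mpr; intro x hx
  rw [rng, PySem.List.mem_pyRange_one] at hx; simp; omega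
lemma filter_pos_rng_zero (m : Int) :
    (rng 0 m).filter (fun x => decide (0 < x)) = rng 1 m := by
  by_cases h : 0 < m
  · rw [rng, PySem.List.pyRange_one_cons h]
    simp only [List.filter_cons]; norm_num
    exact filter_pos_rng 1 m le_rfl
  · rw [rng, PySem.List.pyRange_one_eq_nil (by omega), rng, PySem.List.pyRange_one_eq_nil (by omega)]; simp
lemma getLastD_map_shift (c : Int) : ∀ (b : List Int) (d : Int),
    (b.map (fun x => x + c)).getLastD (d + c) = b.getLastD d + c := by
  intro b
  induction b with
  | nil => intro d; simp
  | cons h r ih => intro d; simp only [List.map_cons, List.getLastD_cons]; exact ih h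
lemma getLastD_cons_shift (c : Int) (b : List Int) :
    (c :: b.map (fun x => x + c)).getLastD 0 = b.getLastD 0 + c := by
  have := getLastD_map_shift c b 0
  simp only [List.getLastD_cons]; simpa using this
lemma NV_getLastD_nonneg (s : Int) : ∀ (k : Nat), ∀ b ∈ NV s k, 0 ≤ b.getLastD 0 := by
  intro k
  induction k with
  | zero => intro b hb; simp [NV] at hb; simp [hb]
  | succ m ih =>
    intro b hb
    simp only [NV, List.mem_flatMap, List.mem_map] at hb
    obtain ⟨b', hb', x, hx, rfl⟩ := hb
    rw [rng, PySem.List.mem_pyRange_one] at hx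
    have := ih b' hb'
    rw [List.getLastD_eq_getLast?, List.getLast?_append]
    simp; omega

lemma flatMap_single {α β : Type} (g : α → β) : ∀ (l : List α),
    l.flatMap (fun x => [g x]) = l.map g := by
  intro l
  induction l with
  | nil => rfl
  | cons h t ih => simp only [List.flatMap_cons, List.map_cons, List.singleton_append, ih]

lemma NV_group (s : Int) : ∀ (k : Nat),
    NV s (k + 1) = (rng 0 (s + 1)).flatMap (fun b1 =>
      (NV (s - b1) k).map (fun b => b1 :: b.map (fun x => x + b1))) := by
  intro k
  induction k with
  | zero =>
    show (NV s 0).flatMap _ = _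
    simp only [NV, List.flatMap_cons, List.flatMap_nil, List.append_nil, List.nil_append,
      List.map_cons, List.map_nil, List.getLastD_nil]
    rw [flatMap_single (fun b1 : Int => [b1])]
  | succ m ih =>
    show (NV s (m + 1)).flatMap _ = _
    rw [ih]
    simp only [List.flatMap_assoc, List.flatMap_map]
    congr 1; funext b1
    show ((NV (s - b1) m).flatMap _) = _
    conv_rhs => rw [show NV (s - b1) (m+1) = (NV (s - b1) m).flatMap (fun b => (rng (b.getLastD 0) ((s - b1) + 1)).map (fun x => b ++ [x])) from rfl]
    simp only [List.map_flatMap]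
    congr 1; funext b
    rw [getLastD_cons_shift]
    have : rng (b.getLastD 0 + b1) (s + 1) = (rng (b.getLastD 0) (s - b1 + 1)).map (fun x => x + b1) := by
      have := rng_shift (b.getLastD 0) (s - b1 + 1) b1
      rw [← this]; congr 1; ring
    rw [this]
    simp only [List.map_map, List.map_map]
    congr 1; funext x
    simp [List.map_append]

lemma NVp_group (s : Int) : ∀ (k : Nat),
    NVp s (k + 1) = (rng 1 (s + 1)).flatMap (fun a1 =>
      (NV (s - a1) k).map (fun b => a1 :: b.map (fun x => x + a1))) := by
  intro k
  induction k with
  | zero =>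
    show (NVp s 0).flatMap _ = _
    simp only [NVp, List.flatMap_cons, List.flatMap_nil, List.append_nil, List.nil_append,
      List.map_cons, List.map_nil, List.getLastD_nil, NV]
    rw [filter_pos_rng_zero]
    rw [flatMap_single (fun b1 : Int => [b1])]
  | succ m ih =>
    show (NVp s (m + 1)).flatMap _ = _
    rw [ih]
    simp only [List.flatMap_assoc, List.flatMap_map]
    apply List.flatMap_congr
    intro a1 ha1
    rw [rng, PySem.List.mem_pyRange_one] at ha1
    conv_rhs => rw [show NV (s - a1) (m + 1) = (NV (s - a1) m).flatMap
      (fun b => (rng (b.getLastD 0) ((s - a1) + 1)).map (fun x => b ++ [x])) from rfl]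
    rw [List.map_flatMap]
    apply List.flatMap_congr
    intro b hb
    have hb0 : 0 ≤ b.getLastD 0 := NV_getLastD_nonneg (s - a1) m b hb
    rw [getLastD_cons_shift]
    rw [filter_pos_rng _ _ (by omega)]
    have : rng (b.getLastD 0 + a1) (s + 1) = (rng (b.getLastD 0) (s - a1 + 1)).map (fun x => x + a1) := by
      have := rng_shift (b.getLastD 0) (s - a1 + 1) a1
      rw [← this]; congr 1; ring
    rw [this]
    simp only [List.map_map, List.map_map]
    congr 1; funext x
    simp [List.map_append]

def dif : Int → List Int → List Int
  | _, [] => []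
  | p, h :: r => (h - p) :: dif h r
def C : Nat → Int → List (List Int)
  | 0, t => [[t]]
  | k + 1, t => (rng 0 (t + 1)).flatMap (fun x => (C k (t - x)).map (fun r => x :: r))
def yieldsOf (s : Int) (k : Nat) : List (List Int) :=
  (NV s k).flatMap (fun b => (rng (b.getLastD 0) (s + 1)).map (fun x => dif 0 (b ++ [x, s])))
def yieldsP (s : Int) (k : Nat) : List (List Int) :=
  (NVp s k).flatMap (fun b => (rng (b.getLastD 0) (s + 1)).map (fun x => dif 0 (b ++ [x, s])))
def OutG (s : Int) : Nat → Nat → List (List Int)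
  | k, 0 => yieldsP s k
  | k, m + 1 => (OutG s k m).map (fun l => 0 :: l) ++ yieldsP s (k + m + 1)
def Tail (s : Int) : Nat → Nat → List (List Int)
  | _, 0 => []
  | k, r + 1 => (yieldsP s k).map (fun l => List.replicate r 0 ++ l) ++ Tail s (k + 1) r

lemma dif_shift (c : Int) : ∀ (w : List Int) (p : Int),
    dif (p + c) (w.map (fun x => x + c)) = dif p w := by
  intro w
  induction w with
  | nil => intro p; simp [dif]
  | cons h r ih => intro p; simp only [List.map_cons, dif]; rw [ih]; ring_nf

lemma C_split (k : Nat) (t : Int) (h : 0 ≤ t) :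
    C (k + 1) t = (C k t).map (fun r => 0 :: r)
      ++ (rng 1 (t + 1)).flatMap (fun x => (C k (t - x)).map (fun r => x :: r)) := by
  show (rng 0 (t + 1)).flatMap _ = _
  rw [rng, PySem.List.pyRange_one_cons (by omega)]
  simp only [List.flatMap_cons, sub_zero, zero_add]
  rfl

lemma dif_cons_shift (b1 : Int) (b : List Int) (x s : Int) :
    dif 0 ((b1 :: b.map (fun v => v + b1)) ++ [x + b1, s]) = b1 :: dif 0 (b ++ [x, s - b1]) := by
  have h1 : (b.map (fun v => v + b1)) ++ [x + b1, s] = (b ++ [x, s - b1]).map (fun v => v + b1) := by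
    simp [List.map_append]
  simp only [List.cons_append, dif, sub_zero]
  rw [h1]
  have := dif_shift b1 (b ++ [x, s - b1]) 0
  rw [zero_add] at this
  rw [this]

lemma inner_yield (b1 : Int) (b : List Int) (s : Int) :
    (rng ((b1 :: b.map (fun v => v + b1)).getLastD 0) (s + 1)).map
        (fun x => dif 0 ((b1 :: b.map (fun v => v + b1)) ++ [x, s]))
      = ((rng (b.getLastD 0) ((s - b1) + 1)).map
          (fun x => dif 0 (b ++ [x, s - b1]))).map (fun r => b1 :: r) := by
  rw [getLastD_cons_shift]
  have : rng (b.getLastD 0 + b1) (s + 1) = (rng (b.getLastD 0) (s - b1 + 1)).map (fun x => x + b1) := by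
    have := rng_shift (b.getLastD 0) (s - b1 + 1) b1
    rw [← this]; congr 1; ring
  rw [this]
  simp only [List.map_map]
  congr 1; funext x
  simp only [Function.comp_apply]
  exact dif_cons_shift b1 b x s

lemma yieldsOf_eq_C : ∀ (k : Nat) (s : Int), yieldsOf s k = C (k + 1) s := by
  intro k
  induction k with
  | zero =>
    intro s
    show (NV s 0).flatMap _ = _
    simp only [NV, List.flatMap_cons, List.flatMap_nil, List.append_nil, List.getLastD_nil,
      List.nil_append]
    show _ = (rng 0 (s + 1)).flatMap _
    apply Eq.trans (b := (rng 0 (s + 1)).flatMap (fun x => [[x, s - x]]))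
    · rw [flatMap_single (fun x : Int => [x, s - x])]
      congr 1; funext x; simp [dif]
    · apply List.flatMap_congr; intro x _
      show _ = (C 0 (s - x)).map _
      simp [C]
  | succ m ih =>
    intro s
    show (NV s (m + 1)).flatMap _ = _
    rw [NV_group]
    simp only [List.flatMap_assoc, List.flatMap_map]
    show _ = (rng 0 (s + 1)).flatMap _
    apply List.flatMap_congr
    intro b1 _
    show (NV (s - b1) m).flatMap _ = (C (m + 1) (s - b1)).map _
    rw [← ih (s - b1)]
    show _ = (yieldsOf (s - b1) m).map _
    rw [yieldsOf, List.map_flatMap]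
    apply List.flatMap_congr
    intro b _
    exact inner_yield b1 b s

lemma yieldsP_zero (s : Int) : yieldsP s 0 = C 1 s := by
  have h0 : yieldsP s 0 = yieldsOf s 0 := by
    show (NVp s 0).flatMap _ = (NV s 0).flatMap _
    rfl
  rw [h0, yieldsOf_eq_C]

lemma yieldsP_succ (s : Int) (k : Nat) :
    yieldsP s (k + 1) = (rng 1 (s + 1)).flatMap (fun a1 =>
      (C (k + 1) (s - a1)).map (fun r => a1 :: r)) := by
  show (NVp s (k + 1)).flatMap _ = _
  rw [NVp_group]
  simp only [List.flatMap_assoc, List.flatMap_map]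
  apply List.flatMap_congr
  intro a1 _
  show (NV (s - a1) k).flatMap _ = (C (k + 1) (s - a1)).map _
  rw [← yieldsOf_eq_C k (s - a1)]
  rw [yieldsOf, List.map_flatMap]
  apply List.flatMap_congr
  intro b _
  exact inner_yield a1 b s

lemma OutG_front (s : Int) : ∀ (m k : Nat),
    OutG s k (m + 1) = (yieldsP s k).map (fun l => List.replicate (m + 1) 0 ++ l)
      ++ OutG s (k + 1) m := by
  intro m
  induction m with
  | zero =>
    intro k
    show (OutG s k 0).map _ ++ yieldsP s (k + 0 + 1) = _
    show (yieldsP s k).map _ ++ yieldsP s (k + 0 + 1) = _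
    simp [OutG]
  | succ m ih =>
    intro k
    show (OutG s k (m + 1)).map _ ++ yieldsP s (k + (m + 1) + 1) = _
    rw [ih k]
    simp only [List.map_append, List.map_map, List.append_assoc]
    rw [show k + (m + 1) + 1 = (k + 1) + m + 1 from by omega]
    have h1 : ((fun l => (0 : Int) :: l) ∘ (fun l => List.replicate (m + 1) (0 : Int) ++ l))
        = (fun l => List.replicate (m + 1 + 1) (0 : Int) ++ l) := by
      funext l; simp [List.replicate_succ]
    rw [h1]
    rfl

lemma Tail_eq_OutG (s : Int) : ∀ (m k : Nat), Tail s k (m + 1) = OutG s k m := by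
  intro m
  induction m with
  | zero =>
    intro k
    show (yieldsP s k).map _ ++ Tail s (k + 1) 0 = _
    show _ = yieldsP s k
    simp [Tail]
  | succ m ih =>
    intro k
    show (yieldsP s k).map _ ++ Tail s (k + 1) (m + 1) = _
    rw [ih (k + 1), OutG_front]

lemma OutG_eq_C (s : Int) (h : 0 ≤ s) : ∀ (m : Nat), OutG s 0 m = C (m + 1) s := by
  intro m
  induction m with
  | zero => exact yieldsP_zero s
  | succ m ih =>
    show (OutG s 0 m).map _ ++ yieldsP s (0 + m + 1) = _
    rw [ih, C_split (m + 1) s h]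
    congr 1
    rw [show (0 + m + 1) = m + 1 from by omega, yieldsP_succ]

lemma sabComps_eq_C (sh : Int) : ∀ (k : Nat) (t : Int),
    sabComps sh (k + 1) t = (C k t).map (fun r => r.map (fun v => v + sh)) := by
  intro k
  induction k with
  | zero => intro t; simp [sabComps, C]
  | succ m ih =>
    intro t
    show (PySem.List.pyRange 0 (t + 1) 1).flatMap _ = _
    show _ = ((rng 0 (t + 1)).flatMap _).map _
    rw [List.map_flatMap]
    apply List.flatMap_congr
    intro x _
    rw [ih (t - x)]
    simp only [List.map_map]
    rfl

lemma sabComps_ones : ∀ (k : Nat), sabComps 1 (k + 1) 0 = [List.replicate (k + 1) 1] := by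
  intro k
  induction k with
  | zero => simp [sabComps]
  | succ m ih =>
    show (PySem.List.pyRange 0 (0 + 1) 1).flatMap _ = _
    rw [show ((0 : Int) + 1) = 1 from rfl, PySem.List.pyRange_one_cons (by omega),
      PySem.List.pyRange_one_eq_nil (by omega)]
    simp only [List.flatMap_cons, List.flatMap_nil, List.append_nil, sub_zero, zero_add]
    rw [ih]
    simp [List.replicate_succ]

lemma NVp_length (s : Int) : ∀ (k : Nat), ∀ a ∈ NVp s k, a.length = k := by
  intro k
  induction k with
  | zero => intro a ha; simp [NVp] at ha; simp [ha]
  | succ m ih =>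
    intro a ha
    simp only [NVp, List.mem_flatMap, List.mem_map, List.mem_filter] at ha
    obtain ⟨b, hb, x, _, rfl⟩ := ha
    simp [ih b hb]

lemma NVp_lastD_mem (s : Int) (hs : 1 ≤ s) : ∀ (k : Nat), ∃ a ∈ NVp s k, a.getLastD 0 ≤ s := by
  intro k
  induction k with
  | zero => exact ⟨[], by simp [NVp], by simp; omega⟩
  | succ m ih =>
    obtain ⟨a, ha, hle⟩ := ih
    refine ⟨a ++ [s], ?_, by simp⟩
    simp only [NVp, List.mem_flatMap, List.mem_map, List.mem_filter]
    refine ⟨a, ha, s, ⟨?_, by simp; omega⟩, rfl⟩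
    rw [rng, PySem.List.mem_pyRange_one]
    constructor
    · exact hle
    · omega

lemma NVp_ne_nil (s : Int) (hs : 1 ≤ s) (k : Nat) : NVp s k ≠ [] := by
  obtain ⟨a, ha, _⟩ := NVp_lastD_mem s hs k
  exact List.ne_nil_of_mem ha

lemma foldl_pair_append {α β γ : Type} (g : α → β) (P : α → Prop) [DecidablePred P] (hf : α → γ) :
    ∀ (l : List α) (acc : List β × List γ),
    l.foldl (fun acc2 x => (acc2.1 ++ [g x], if P x then acc2.2 ++ [hf x] else acc2.2)) acc
      = (acc.1 ++ l.map g, acc.2 ++ (l.filter (fun x => decide (P x))).map hf) := by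
  intro l
  induction l with
  | nil => intro acc; simp
  | cons h t ih =>
    intro acc
    rw [List.foldl_cons, ih]
    by_cases hp : P h
    · simp [hp]
    · simp [hp]

lemma foldl_pair_flat {α β γ : Type} (G : α → List β) (H : α → List γ) :
    ∀ (l : List α) (acc : List β × List γ),
    l.foldl (fun acc b => (acc.1 ++ G b, acc.2 ++ H b)) acc
      = (acc.1 ++ l.flatMap G, acc.2 ++ l.flatMap H) := by
  intro l
  induction l with
  | nil => intro acc; simp
  | cons h t ih =>
    intro acc
    rw [List.foldl_cons, ih]
    simp

def enc (n : Nat) (s : Int) (a : List Int) : List Int :=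
  List.replicate (n - a.length) 0 ++ a ++ [s]

lemma pyGetD_cons_shift (a : Int) (l : List Int) (i : Int) (h : 0 ≤ i) :
    PySem.List.pyGetD (a :: l) (i + 1) 0 = PySem.List.pyGetD l i 0 := by
  rw [PySem.List.pyGetD_of_nonneg _ _ (by omega), PySem.List.pyGetD_of_nonneg _ _ h]
  rw [show (i + 1).toNat = i.toNat + 1 from by omega]
  rfl

lemma difIdx (sh : Int) : ∀ (t : List Int) (h : Int),
    (rng 1 ((t.length : Int) + 1)).map (fun y =>
        PySem.List.pyGetD (h :: t) y 0 - PySem.List.pyGetD (h :: t) (y - 1) 0 + sh)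
      = (dif h t).map (fun v => v + sh) := by
  intro t
  induction t with
  | nil =>
    intro h
    rw [rng, PySem.List.pyRange_one_eq_nil (by simp)]
    simp [dif]
  | cons c t ih =>
    intro h
    rw [rng, PySem.List.pyRange_one_cons (by simp)]
    simp only [List.map_cons, dif]
    congr 1
    · show PySem.List.pyGetD (h :: c :: t) 1 0 - PySem.List.pyGetD (h :: c :: t) 0 0 + sh = c - h + sh
      rw [PySem.List.pyGetD_eq_getElem _ _ (by omega) (by simp), PySem.List.pyGetD_eq_getElem _ _ (by omega) (by simp; omega)]
      norm_num
    · have hshift : PySem.List.pyRange (1 + 1) (((t.length : Int) + 1) + 1) 1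
          = (rng 1 ((t.length : Int) + 1)).map (fun x => x + 1) :=
        rng_shift 1 ((t.length : Int) + 1) 1
      rw [show ((c :: t).length : Int) + 1 = ((t.length : Int) + 1) + 1 from by simp, hshift]
      rw [List.map_map, ← ih c]
      apply List.map_congr_left
      intro y hy
      rw [rng, PySem.List.mem_pyRange_one] at hy
      simp only [Function.comp_apply]
      rw [show y + 1 - 1 = (y - 1) + 1 from by ring]
      rw [pyGetD_cons_shift _ _ y (by omega), pyGetD_cons_shift _ _ (y - 1) (by omega)]

lemma enc_getD_neg2 (n : Nat) (s : Int) (a : List Int) (hk : a.length + 2 ≤ n) :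
    PySem.List.pyGetD (enc n s a) (-2) 0 = a.getLastD 0 := by
  have h2 : enc n s a = (List.replicate (n - a.length) 0 ++ a) ++ [s] := by
    simp [enc]
  have hu : (List.replicate (n - a.length) (0 : Int) ++ a).length = n := by simp; omega
  have hlen : (enc n s a).length = n + 1 := by rw [h2]; simp; omega
  rw [PySem.List.pyGetD_neg_ofNat _ 2 _ (by omega) (by omega)]
  simp only [hlen]
  simp only [h2]
  rw [List.getElem_append_left (by omega)]
  have hne : (List.replicate (n - a.length) (0 : Int) ++ a) ≠ [] := by
    intro hc; rw [hc] at hu; simp at hu; omega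
  have hidx : n + 1 - 2 = (List.replicate (n - a.length) (0 : Int) ++ a).length - 1 := by omega
  simp only [hidx]
  rw [← List.getLast_eq_getElem hne]
  by_cases hae : a = []
  · subst hae
    have : (List.replicate (n - [].length) (0 : Int) ++ []).getLast hne
        = (List.replicate (n - List.length ([] : List Int)) (0 : Int)).getLast (by simpa using hne) := by
      congr 1; simp
    rw [this, List.getLast_replicate]
    rfl
  · rw [List.getLast_append_of_ne_nil hne hae]
    rw [List.getLastD_eq_getLast?, List.getLast?_eq_some_getLast hae]
    rfl

lemma enc_slice (n : Nat) (s : Int) (a : List Int) (hk : a.length + 2 ≤ n) (x : Int) :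
    PySem.List.slice (enc n s a) (some 1) (some (n : Int)) ++ [x, s] = enc n s (a ++ [x]) := by
  rw [show (1 : Int) = ((1 : Nat) : Int) from rfl, PySem.List.slice_natCast]
  have h1 : enc n s a = (0 : Int) :: (List.replicate (n - a.length - 1) 0 ++ a ++ [s]) := by
    rw [enc, show n - a.length = (n - a.length - 1) + 1 from by omega, List.replicate_succ]
    simp
  rw [h1]
  simp only [List.drop_succ_cons, List.drop_zero]
  rw [show List.replicate (n - a.length - 1) (0:Int) ++ a ++ [s] = (List.replicate (n - a.length - 1) (0:Int) ++ a) ++ [s] from by simp [List.append_assoc]]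
  rw [List.take_append_of_le_length (by simp; omega)]
  rw [List.take_of_length_le (by simp; omega)]
  rw [enc]
  simp [List.append_assoc]
  omega


def levelBars (n : Nat) (s : Int) (k : Nat) : List (List Int × Int) :=
  (NVp s k).map (fun a => (enc n s a, (k : Int) + 1))

lemma enc_cons_zero (n : Nat) (s : Int) (w : List Int) (h : w.length + 1 ≤ n) :
    enc n s w = 0 :: (List.replicate (n - w.length - 1) 0 ++ w ++ [s]) := by
  rw [enc, show n - w.length = (n - w.length - 1) + 1 from by omega, List.replicate_succ]
  simp

lemma sabLevel_flat (bins stars2 sh : Int) (bars : List (List Int × Int)) :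
    sabLevel bins stars2 sh bars =
      (bars.flatMap (fun b =>
        (PySem.List.pyRange (PySem.List.pyGetD b.1 (-2) 0) (stars2 + 1) 1).map (fun x =>
          (PySem.List.pyRange 1 (bins + 1) 1).map (fun y =>
            PySem.List.pyGetD (PySem.List.slice b.1 (some 1) (some bins) ++ [x, stars2]) y 0 -
            PySem.List.pyGetD (PySem.List.slice b.1 (some 1) (some bins) ++ [x, stars2]) (y - 1) 0 + sh))),
       bars.flatMap (fun b =>
        ((PySem.List.pyRange (PySem.List.pyGetD b.1 (-2) 0) (stars2 + 1) 1).filter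
            (fun x => decide (b.2 < bins - 1 ∧ 0 < x))).map (fun x =>
          (PySem.List.slice b.1 (some 1) (some bins) ++ [x, stars2], b.2 + 1)))) := by
  unfold sabLevel
  have hbody : (fun (acc : List (List Int) × List (List Int × Int)) (b : List Int × Int) =>
      (PySem.List.pyRange (PySem.List.pyGetD b.1 (-2) 0) (stars2 + 1) 1).foldl (fun acc2 x =>
        let newBar := PySem.List.slice b.1 (some 1) (some bins) ++ [x, stars2]
        let nbs := if b.2 < bins - 1 ∧ 0 < x then acc2.2 ++ [(newBar, b.2 + 1)] else acc2.2
        (acc2.1 ++ [(PySem.List.pyRange 1 (bins + 1) 1).map (fun y =>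
            PySem.List.pyGetD newBar y 0 - PySem.List.pyGetD newBar (y - 1) 0 + sh)], nbs))
        acc)
      = (fun acc b =>
        (acc.1 ++ (PySem.List.pyRange (PySem.List.pyGetD b.1 (-2) 0) (stars2 + 1) 1).map (fun x =>
          (PySem.List.pyRange 1 (bins + 1) 1).map (fun y =>
            PySem.List.pyGetD (PySem.List.slice b.1 (some 1) (some bins) ++ [x, stars2]) y 0 -
            PySem.List.pyGetD (PySem.List.slice b.1 (some 1) (some bins) ++ [x, stars2]) (y - 1) 0 + sh)),
         acc.2 ++ ((PySem.List.pyRange (PySem.List.pyGetD b.1 (-2) 0) (stars2 + 1) 1).filter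
            (fun x => decide (b.2 < bins - 1 ∧ 0 < x))).map (fun x =>
          (PySem.List.slice b.1 (some 1) (some bins) ++ [x, stars2], b.2 + 1)))) := by
    funext acc b
    exact foldl_pair_append _ _ _ _ _
  rw [hbody, foldl_pair_flat]
  simp

lemma dif_repl (j : Nat) (w : List Int) :
    dif 0 (List.replicate j 0 ++ w) = List.replicate j 0 ++ dif 0 w := by
  induction j with
  | zero => simp
  | succ m ih => simp only [List.replicate_succ, List.cons_append, dif]; simpa using ih

lemma sabLevel_eq (n k : Nat) (s sh : Int) (hk : k + 2 ≤ n) :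
    sabLevel (n : Int) s sh (levelBars n s k)
      = (((yieldsP s k).map (fun l => List.replicate (n - 2 - k) 0 ++ l)).map
          (fun l => l.map (fun v => v + sh)),
        if k + 3 ≤ n then levelBars n s (k + 1) else []) := by
  rw [sabLevel_flat]
  unfold levelBars
  rw [List.flatMap_map, List.flatMap_map]
  have hyield : ∀ a ∈ NVp s k,
      (PySem.List.pyRange (PySem.List.pyGetD (enc n s a) (-2) 0) (s + 1) 1).map (fun x =>
          (PySem.List.pyRange 1 ((n : Int) + 1) 1).map (fun y =>
            PySem.List.pyGetD (PySem.List.slice (enc n s a) (some 1) (some (n : Int)) ++ [x, s]) y 0 -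
            PySem.List.pyGetD (PySem.List.slice (enc n s a) (some 1) (some (n : Int)) ++ [x, s]) (y - 1) 0 + sh))
        = (rng (a.getLastD 0) (s + 1)).map (fun x =>
            (List.replicate (n - 2 - k) 0 ++ dif 0 (a ++ [x, s])).map (fun v => v + sh)) := by
    intro a ha
    have hal : a.length = k := NVp_length s k a ha
    rw [enc_getD_neg2 n s a (by omega)]
    show (rng (a.getLastD 0) (s + 1)).map _ = _
    apply List.map_congr_left
    intro x _
    rw [enc_slice n s a (by omega) x]
    have hlen2 : (a ++ [x]).length = k + 1 := by simp [hal]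
    have htail : enc n s (a ++ [x]) = 0 :: (List.replicate (n - 2 - k) 0 ++ (a ++ [x, s])) := by
      rw [enc_cons_zero n s (a ++ [x]) (by omega)]
      rw [hlen2, show n - (k + 1) - 1 = n - 2 - k from by omega, List.append_assoc]
      simp
    rw [htail]
    have hlt : ((List.replicate (n - 2 - k) (0 : Int) ++ (a ++ [x, s])).length : Int) + 1 = (n : Int) + 1 := by
      simp [hal]; omega
    rw [show PySem.List.pyRange 1 ((n : Int) + 1) 1
        = rng 1 (((List.replicate (n - 2 - k) (0 : Int) ++ (a ++ [x, s])).length : Int) + 1) from by rw [rng, hlt]]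
    rw [difIdx sh (List.replicate (n - 2 - k) (0 : Int) ++ (a ++ [x, s])) 0]
    rw [dif_repl]
  have hchild : ∀ a ∈ NVp s k,
      ((PySem.List.pyRange (PySem.List.pyGetD (enc n s a) (-2) 0) (s + 1) 1).filter
          (fun x => decide ((k : Int) + 1 < (n : Int) - 1 ∧ 0 < x))).map (fun x =>
            (PySem.List.slice (enc n s a) (some 1) (some (n : Int)) ++ [x, s], (k : Int) + 1 + 1))
        = if k + 3 ≤ n then
            ((rng (a.getLastD 0) (s + 1)).filter (fun x => decide (0 < x))).map (fun x =>
              (enc n s (a ++ [x]), ((k + 1 : Nat) : Int) + 1))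
          else [] := by
    intro a ha
    have hal : a.length = k := NVp_length s k a ha
    rw [enc_getD_neg2 n s a (by omega)]
    by_cases h3 : k + 3 ≤ n
    · rw [if_pos h3]
      have hfe : (fun x : Int => decide ((k : Int) + 1 < (n : Int) - 1 ∧ 0 < x))
          = (fun x : Int => decide (0 < x)) := by
        funext x
        have h1 : ((k : Int) + 1 < (n : Int) - 1) = True := by simp; omega
        simp [h1]
      rw [hfe]
      show ((rng (a.getLastD 0) (s + 1)).filter _).map _ = _
      apply List.map_congr_left
      intro x _
      rw [enc_slice n s a (by omega) x]
      refine Prod.ext rfl ?_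
      show (k : Int) + 1 + 1 = ((k + 1 : Nat) : Int) + 1
      push_cast
      ring
    · rw [if_neg h3]
      have hfe : ∀ x : Int, (decide ((k : Int) + 1 < (n : Int) - 1 ∧ 0 < x)) = false := by
        intro x
        simp only [decide_eq_false_iff_not]
        intro hc
        omega
      rw [List.filter_eq_nil_iff.mpr (fun x _ => by simp [hfe x])]
      simp
  refine Prod.ext ?_ ?_
  · show (NVp s k).flatMap (fun a =>
        (PySem.List.pyRange (PySem.List.pyGetD (enc n s a) (-2) 0) (s + 1) 1).map (fun x =>
          (PySem.List.pyRange 1 ((n : Int) + 1) 1).map (fun y =>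
            PySem.List.pyGetD (PySem.List.slice (enc n s a) (some 1) (some (n : Int)) ++ [x, s]) y 0 -
            PySem.List.pyGetD (PySem.List.slice (enc n s a) (some 1) (some (n : Int)) ++ [x, s]) (y - 1) 0 + sh)))
      = ((yieldsP s k).map (fun l => List.replicate (n - 2 - k) 0 ++ l)).map (fun l => l.map (fun v => v + sh))
    rw [List.flatMap_congr hyield]
    unfold yieldsP
    rw [List.map_flatMap, List.map_flatMap]
    apply List.flatMap_congr
    intro a _
    simp [List.map_map]
  · show (NVp s k).flatMap (fun a =>
        ((PySem.List.pyRange (PySem.List.pyGetD (enc n s a) (-2) 0) (s + 1) 1).filter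
          (fun x => decide ((k : Int) + 1 < (n : Int) - 1 ∧ 0 < x))).map (fun x =>
          (PySem.List.slice (enc n s a) (some 1) (some (n : Int)) ++ [x, s], (k : Int) + 1 + 1)))
      = (if k + 3 ≤ n then levelBars n s (k + 1) else [])
    rw [List.flatMap_congr hchild]
    by_cases h3 : k + 3 ≤ n
    · simp only [if_pos h3]
      unfold levelBars
      rw [show NVp s (k + 1) = (NVp s k).flatMap (fun b =>
          ((rng (b.getLastD 0) (s + 1)).filter (fun x => decide (0 < x))).map (fun x => b ++ [x])) from rfl]
      rw [List.map_flatMap]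
      apply List.flatMap_congr
      intro a _
      rw [List.map_map]
      rfl
    · simp only [if_neg h3]
      simp

lemma sabLoop_nil (b s sh : Int) (f : Nat) : sabLoop b s sh f [] = [] := by
  cases f <;> simp [sabLoop]

lemma levelBars_pos (n : Nat) (s : Int) (hs : 1 ≤ s) (k : Nat) : 0 < (levelBars n s k).length := by
  simp only [levelBars, List.length_map]
  exact List.length_pos_iff.mpr (NVp_ne_nil s hs k)

lemma loop_tail (n : Nat) (s sh : Int) (hs : 1 ≤ s) :
    ∀ (r k fuel : Nat), k + r + 2 = n → r < fuel →
    sabLoop (n : Int) s sh fuel (levelBars n s k)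
      = (Tail s k (r + 1)).map (fun l => l.map (fun v => v + sh)) := by
  intro r
  induction r with
  | zero =>
    intro k fuel hkr hf
    obtain ⟨f, rfl⟩ : ∃ f, fuel = f + 1 := ⟨fuel - 1, by omega⟩
    show (if 0 < (levelBars n s k).length then
        (sabLevel (n : Int) s sh (levelBars n s k)).1
          ++ sabLoop (n : Int) s sh f (sabLevel (n : Int) s sh (levelBars n s k)).2
      else []) = _
    rw [if_pos (levelBars_pos n s hs k)]
    rw [sabLevel_eq n k s sh (by omega)]
    rw [if_neg (by omega : ¬ k + 3 ≤ n)]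
    show _ ++ sabLoop (n : Int) s sh f [] = _
    rw [sabLoop_nil]
    rw [show Tail s k (0 + 1) = (yieldsP s k).map (fun l => List.replicate 0 0 ++ l)
        ++ Tail s (k + 1) 0 from rfl]
    rw [show n - 2 - k = 0 from by omega]
    simp [Tail]
  | succ r ih =>
    intro k fuel hkr hf
    obtain ⟨f, rfl⟩ : ∃ f, fuel = f + 1 := ⟨fuel - 1, by omega⟩
    show (if 0 < (levelBars n s k).length then
        (sabLevel (n : Int) s sh (levelBars n s k)).1
          ++ sabLoop (n : Int) s sh f (sabLevel (n : Int) s sh (levelBars n s k)).2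
      else []) = _
    rw [if_pos (levelBars_pos n s hs k)]
    rw [sabLevel_eq n k s sh (by omega)]
    rw [if_pos (by omega : k + 3 ≤ n)]
    show _ ++ sabLoop (n : Int) s sh f (levelBars n s (k + 1)) = _
    rw [ih (k + 1) f (by omega) (by omega)]
    rw [show Tail s k (r + 1 + 1) = (yieldsP s k).map (fun l => List.replicate (r + 1) 0 ++ l)
        ++ Tail s (k + 1) (r + 1) from rfl]
    rw [List.map_append]
    rw [show n - 2 - k = r + 1 from by omega]

lemma main_case (n : Nat) (s sh : Int) (hn : 2 ≤ n) (hs : 1 ≤ s) :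
    sabLoop (n : Int) s sh n [(List.replicate n 0 ++ [s], 1)] = sabComps sh n s := by
  have h0 : [((List.replicate n (0 : Int) ++ [s]), (1 : Int))] = levelBars n s 0 := by
    simp [levelBars, NVp, enc]
  rw [h0]
  rw [loop_tail n s sh hs (n - 2) 0 n (by omega) (by omega)]
  rw [Tail_eq_OutG, OutG_eq_C s (by omega)]
  conv_rhs => rw [show n = ((n - 2) + 1) + 1 from by omega]
  rw [sabComps_eq_C]


theorem sab_guard_eq (bins stars : Int) (ae : Bool) (hb : 1 ≤ bins) (hst : 1 ≤ stars)
    (hae : ae = true ∨ bins ≤ stars) :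
    stars_and_bars bins stars ae = stars_and_bars_alt bins stars ae := by
  have hnot1 : ¬(bins < 1 ∨ stars < 1) := by omega
  have hnot2 : ¬(ae = false ∧ stars < bins) := by
    rintro ⟨h1, h2⟩
    rcases hae with h | h
    · rw [h] at h1; cases h1
    · omega
  unfold stars_and_bars stars_and_bars_alt
  rw [if_neg hnot1, if_neg hnot2, if_neg hnot1, if_neg hnot2]
  by_cases h1 : bins = 1
  · rw [if_pos h1]
    show _ = sabComps _ bins.toNat _
    rw [h1]
    show [[stars]] = sabComps _ (1 : Int).toNat _
    cases ae
    · show [[stars]] = sabComps 1 1 (stars - 1 * 1)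
      show [[stars]] = [[stars - 1 * 1 + 1]]
      norm_num
    · show [[stars]] = sabComps 0 1 (stars - 0 * 1)
      show [[stars]] = [[stars - 0 * 1 + 0]]
      norm_num
  · rw [if_neg h1]
    by_cases h2 : ae = false ∧ stars = bins
    · rw [if_pos h2]
      obtain ⟨hf, hsb⟩ := h2
      rw [hf]
      show _ = sabComps 1 bins.toNat (stars - 1 * bins)
      rw [show stars - 1 * bins = 0 from by omega]
      rw [show bins.toNat = (bins.toNat - 1) + 1 from by omega, sabComps_ones]
    · rw [if_neg h2]
      have hn : ((bins.toNat : Nat) : Int) = bins := Int.toNat_of_nonneg (by omega)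
      have hn2 : 2 ≤ bins.toNat := by omega
      cases ae
      · -- allowEmpty = False: sh = 1, s = stars - bins
        have hs1 : 1 ≤ stars - bins := by
          rcases hae with h | h
          · cases h
          · have : stars ≠ bins := fun hc => h2 ⟨rfl, hc⟩
            omega
        show sabLoop bins (stars - bins) 1 bins.toNat
            [(List.replicate bins.toNat 0 ++ [stars - bins], 1)]
          = sabComps 1 bins.toNat (stars - 1 * bins)
        rw [show stars - 1 * bins = stars - bins from by ring]
        have h := main_case bins.toNat (stars - bins) 1 hn2 hs1
        rw [hn] at h
        exact h
      · -- allowEmpty = True: sh = 0, s = stars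
        show sabLoop bins stars 0 bins.toNat [(List.replicate bins.toNat 0 ++ [stars], 1)]
          = sabComps 0 bins.toNat (stars - 0 * bins)
        rw [show stars - 0 * bins = stars from by ring]
        have h := main_case bins.toNat stars 0 hn2 hst
        rw [hn] at h
        exact h

-- ===== VERDICT (by name: the statement is the Claim_ definition above) =====
theorem stars_and_bars_spec : Claim_equal_stars_and_bars := by
  intro bins stars allowEmpty _ hpre
  unfold Spec_stars_and_bars
  exact sab_guard_eq bins stars allowEmpty hpre.1 hpre.2.1 hpre.2.2
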